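-- pv_equiv track=rewrite | github.com/MiMickyyy/PLM-Based-Cas12a-Shuffling-Model | cas12a_shuffling_model/src/cas12a_shuffling_model/io/loaders.py | _extract_longest_run
-- ===== SOURCE A (Python) =====
-- def _extract_longest_run(text: str, allowed_chars: set[str], min_len: int) -> str | None:
--     best = ""
--     current = []
--     for ch in text:
--         if ch in allowed_chars:
--             current.append(ch)
--         else:
--             if len(current) > len(best):
--                 best = "".join(current)
--             current = []
--     if len(current) > len(best):
--         best = "".join(current)
--     if len(best) >= min_len:
--         return best
--     return None
-- ===== SOURCE B (Python) =====
-- def _extract_longest_run(text: str, allowed_chars: set[str], min_len: int) -> str | None: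
--     # Materialize every maximal run of allowed characters first, then pick the
--     # best one in a separate reduction (max is first-wins on ties, like A's '>').
--     runs = []
--     i, n = 0, len(text)
--     while i < n:
--         if text[i] in allowed_chars:
--             j = i
--             while j < n and text[j] in allowed_chars:
--                 j += 1
--             runs.append(text[i:j])
--             i = j
--         else:
--             i += 1
--     best = max(runs, key=len, default="")
--     return best if len(best) >= min_len else None
-- ===== Notes on version B (the rewrite author's own statement) =====
-- stated objective: alternative
-- what changed: B materializes the list of maximal allowed-char runs (outer skip loop + inner extend loop) and then picks the winner with a separate max(runs, key=len, default=""), instead of A's single pass that interleaves buffering the current run with updating a running best.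
import Mathlib
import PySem

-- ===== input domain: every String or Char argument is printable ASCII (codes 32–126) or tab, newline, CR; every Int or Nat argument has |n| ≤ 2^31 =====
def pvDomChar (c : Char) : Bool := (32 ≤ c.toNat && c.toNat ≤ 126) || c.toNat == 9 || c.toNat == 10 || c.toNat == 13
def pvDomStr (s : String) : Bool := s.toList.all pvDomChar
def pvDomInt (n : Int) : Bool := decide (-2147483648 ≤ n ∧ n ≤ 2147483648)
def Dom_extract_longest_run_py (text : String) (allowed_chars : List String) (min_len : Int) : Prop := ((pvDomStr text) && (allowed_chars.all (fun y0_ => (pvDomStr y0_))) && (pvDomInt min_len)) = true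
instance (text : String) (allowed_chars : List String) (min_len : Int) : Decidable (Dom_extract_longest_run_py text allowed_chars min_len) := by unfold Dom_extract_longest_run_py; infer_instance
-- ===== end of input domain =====

-- B materializes the list of maximal allowed-char runs and then picks the first longest
-- with a separate max-reduction, instead of A's single pass with a running best (alternative).


-- ===== PORT A =====
-- A's loop: buffer the current run in `current` (st.2), keep a running `best` (st.1);
-- "".join is tracked at the List Char level, String.ofList is the final join.
def extract_longest_run_py (text : String) (allowed_chars : List String) (min_len : Int) : Option String :=
  let st := text.toList.foldl
    (fun (st : List Char × List Char) ch =>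
      if allowed_chars.contains (String.ofList [ch]) then (st.1, st.2 ++ [ch])
      else if st.2.length > st.1.length then (st.2, ([] : List Char))
      else (st.1, ([] : List Char)))
    (([] : List Char), ([] : List Char))
  let best := if st.2.length > st.1.length then st.2 else st.1
  if min_len ≤ (best.length : Int) then some (String.ofList best) else none

-- ===== PORT B =====
-- Source B's run collection: the outer loop skips disallowed chars; on an allowed char the
-- inner scan `while j < n and text[j] in allowed_chars: j += 1` is takeWhile, the slice
-- text[i:j] is the scanned prefix, and the jump `i = j` is dropWhile (exact for these).
def pvRunsB (p : Char → Bool) : List Char → List (List Char)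
  | [] => []
  | c :: cs =>
    if p c then (c :: cs.takeWhile p) :: pvRunsB p (cs.dropWhile p)
    else pvRunsB p cs
  termination_by l => l.length
  decreasing_by
    · have h := List.length_dropWhile_le p cs
      simp; omega
    · simp

def extract_longest_run_py_alt (text : String) (allowed_chars : List String) (min_len : Int) : Option String :=
  let runs := pvRunsB (fun ch => allowed_chars.contains (String.ofList [ch])) text.toList
  let best := PySem.List.maxD runs (fun r => r.length) ([] : List Char)
  if min_len ≤ (best.length : Int) then some (String.ofList best) else none

-- ===== PRECONDITION & SPEC =====
def Spec_extract_longest_run_py (text : String) (allowed_chars : List String) (min_len : Int) (out : Option String) : Prop := out = extract_longest_run_py_alt text allowed_chars min_len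
instance (text : String) (allowed_chars : List String) (min_len : Int) (out : Option String) : Decidable (Spec_extract_longest_run_py text allowed_chars min_len out) := by unfold Spec_extract_longest_run_py; infer_instance

-- ===== CLAIM (what is proved, stated in full; the proofs are below) =====
def Claim_equal_extract_longest_run_py : Prop := ∀ (text : String) (allowed_chars : List String) (min_len : Int), Dom_extract_longest_run_py text allowed_chars min_len → Spec_extract_longest_run_py text allowed_chars min_len (extract_longest_run_py text allowed_chars min_len)

-- ===== LEMMAS AND PROOFS =====

-- the running-best step shared by A's final reduction and Python's max(key=len)
def pvChoose (b r : List Char) : List Char := if r.length > b.length then r else b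

-- A's loop from an arbitrary state, reduced over the runs-with-pending-prefix list
def pvRunsC (p : Char → Bool) (cur : List Char) : List Char → List (List Char)
  | [] => [cur]
  | c :: cs => if p c then pvRunsC p (cur ++ [c]) cs else cur :: pvRunsC p ([] : List Char) cs

theorem pvRunsB_ne_nil (p : Char → Bool) (l : List Char) : ∀ r ∈ pvRunsB p l, r ≠ [] := by
  induction l using pvRunsB.induct p with
  | case1 => simp [pvRunsB]
  | case2 c cs h ih =>
    simp only [pvRunsB, if_pos h, List.mem_cons]
    rintro r (rfl | hr)
    · simp
    · exact ih r hr
  | case3 c cs h ih =>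
    simpa only [pvRunsB, if_neg h] using ih

-- A's fold equals the reduction of pvRunsC
theorem foldA_eq_runsC (p : Char → Bool) (l : List Char) :
    ∀ (b cur : List Char),
      (if (l.foldl
            (fun (st : List Char × List Char) ch =>
              if p ch then (st.1, st.2 ++ [ch])
              else if st.2.length > st.1.length then (st.2, ([] : List Char))
              else (st.1, ([] : List Char))) (b, cur)).2.length >
          (l.foldl
            (fun (st : List Char × List Char) ch =>
              if p ch then (st.1, st.2 ++ [ch])
              else if st.2.length > st.1.length then (st.2, ([] : List Char))
              else (st.1, ([] : List Char))) (b, cur)).1.length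
       then (l.foldl
            (fun (st : List Char × List Char) ch =>
              if p ch then (st.1, st.2 ++ [ch])
              else if st.2.length > st.1.length then (st.2, ([] : List Char))
              else (st.1, ([] : List Char))) (b, cur)).2
       else (l.foldl
            (fun (st : List Char × List Char) ch =>
              if p ch then (st.1, st.2 ++ [ch])
              else if st.2.length > st.1.length then (st.2, ([] : List Char))
              else (st.1, ([] : List Char))) (b, cur)).1)
      = (pvRunsC p cur l).foldl pvChoose b := by
  induction l with
  | nil => intro b cur; simp [pvRunsC, pvChoose]
  | cons c cs ih =>
    intro b cur
    by_cases h : p c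
    · simp only [List.foldl_cons, h, if_pos, pvRunsC]
      exact ih b (cur ++ [c])
    · simp only [List.foldl_cons, h, Bool.false_eq_true, ite_false]
      rw [show pvRunsC p cur (c :: cs) = cur :: pvRunsC p [] cs from by simp [pvRunsC, h],
        List.foldl_cons]
      by_cases h2 : cur.length > b.length
      · rw [if_pos h2, show pvChoose b cur = cur from if_pos h2]
        exact ih cur []
      · rw [if_neg h2, show pvChoose b cur = b from if_neg h2]
        exact ih b []

-- absorbing a (takeWhile, dropWhile) split at the head into pvRunsB
theorem runsB_takeDrop (p : Char → Bool) (cs : List Char) (b : List Char) :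
    ((cs.takeWhile p) :: pvRunsB p (cs.dropWhile p)).foldl pvChoose b
      = (pvRunsB p cs).foldl pvChoose b := by
  cases cs with
  | nil => simp [pvRunsB, pvChoose]
  | cons c cs =>
    by_cases h : p c
    · simp [h, pvRunsB]
    · simp [h, pvRunsB, pvChoose]

-- the pvRunsC reduction equals the pvRunsB reduction
theorem runsC_eq_runsB (p : Char → Bool) (l : List Char) :
    ∀ (b cur : List Char),
      (pvRunsC p cur l).foldl pvChoose b
        = ((cur ++ l.takeWhile p) :: pvRunsB p (l.dropWhile p)).foldl pvChoose b := by
  induction l with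
  | nil => intro b cur; simp [pvRunsC, pvRunsB]
  | cons c cs ih =>
    intro b cur
    by_cases h : p c
    · simp only [pvRunsC, h, ite_true, List.takeWhile_cons, List.dropWhile_cons]
      rw [ih b (cur ++ [c])]
      simp
    · simp only [pvRunsC, h, Bool.false_eq_true, ite_false, List.takeWhile_cons,
        List.dropWhile_cons, List.foldl_cons, List.append_nil]
      rw [ih (pvChoose b cur) []]
      simp only [List.nil_append]
      rw [runsB_takeDrop p cs (pvChoose b cur), pvRunsB, if_neg h]

-- Python's max over a nonempty list is a running-best fold from its head
theorem pvMax?_cons (rs : List (List Char)) (b : List Char) :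
    PySem.List.max? (b :: rs) (fun r => r.length) = some (rs.foldl pvChoose b) := by
  induction rs generalizing b with
  | nil => rfl
  | cons r rs ih =>
    have h1 : PySem.List.max? (b :: r :: rs) (fun r => r.length)
        = PySem.List.max? ((if b.length < r.length then r else b) :: rs) (fun r => r.length) := by
      simp only [PySem.List.max?, List.foldl_cons]
      by_cases h : b.length < r.length <;> simp [h]
    rw [h1, ih, List.foldl_cons, show pvChoose b r = if b.length < r.length then r else b from rfl]

-- Python's max(runs, key=len, default=[]) over nonempty runs is the running-best fold from []
theorem maxD_eq_foldl_choose (rs : List (List Char)) (hne : ∀ r ∈ rs, r ≠ []) :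
    PySem.List.maxD rs (fun r => r.length) ([] : List Char)
      = rs.foldl pvChoose ([] : List Char) := by
  cases rs with
  | nil => rfl
  | cons r rs =>
    have hlen : 0 < r.length := List.length_pos_iff.mpr (hne r (by simp))
    simp only [PySem.List.maxD]
    rw [pvMax?_cons, Option.getD_some, List.foldl_cons,
      show pvChoose [] r = r from if_pos hlen]

-- ===== VERDICT (by name: the statement is the Claim_ definition above) =====
theorem extract_longest_run_py_spec : Claim_equal_extract_longest_run_py := by
  intro text allowed_chars min_len _
  unfold Spec_extract_longest_run_py extract_longest_run_py extract_longest_run_py_alt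
  simp only []
  set p : Char → Bool := fun ch => allowed_chars.contains (String.ofList [ch]) with hp
  rw [foldA_eq_runsC p text.toList ([] : List Char) ([] : List Char),
    runsC_eq_runsB p text.toList ([] : List Char) ([] : List Char),
    List.nil_append, runsB_takeDrop p text.toList ([] : List Char),
    ← maxD_eq_foldl_choose _ (pvRunsB_ne_nil p text.toList)]
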